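-- pv_equiv track=rewrite | github.com/kjellwinblad/HandReco | src/api/specialized_hmm.py | fill_list_with_zeros_in_beginning_to_size
-- ===== SOURCE A (Python) =====
-- def fill_list_with_zeros_in_beginning_to_size(list, size):
--     if(len(list)==size):
--         return list
--     elif(len(list)<size):
--         list.insert(0,0)
--         return fill_list_with_zeros_in_beginning_to_size(list, size)
--     else:
--         del list[len(list)-1]
--         return fill_list_with_zeros_in_beginning_to_size(list, size)
-- ===== SOURCE B (Python) =====
-- def fill_list_with_zeros_in_beginning_to_size(list, size):
--     # closed form: prepend the missing zeros, keep only the first `size` items; mutates in place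
--     list[:] = [0] * (size - len(list)) + list[:size]
--     return list
-- ===== Notes on version B (the rewrite author's own statement) =====
-- stated objective: simpler
-- what changed: Replaces the per-element tail recursion (one insert/delete per step) with a single closed-form slice assignment computing the padded/truncated list at once.
import Mathlib
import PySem

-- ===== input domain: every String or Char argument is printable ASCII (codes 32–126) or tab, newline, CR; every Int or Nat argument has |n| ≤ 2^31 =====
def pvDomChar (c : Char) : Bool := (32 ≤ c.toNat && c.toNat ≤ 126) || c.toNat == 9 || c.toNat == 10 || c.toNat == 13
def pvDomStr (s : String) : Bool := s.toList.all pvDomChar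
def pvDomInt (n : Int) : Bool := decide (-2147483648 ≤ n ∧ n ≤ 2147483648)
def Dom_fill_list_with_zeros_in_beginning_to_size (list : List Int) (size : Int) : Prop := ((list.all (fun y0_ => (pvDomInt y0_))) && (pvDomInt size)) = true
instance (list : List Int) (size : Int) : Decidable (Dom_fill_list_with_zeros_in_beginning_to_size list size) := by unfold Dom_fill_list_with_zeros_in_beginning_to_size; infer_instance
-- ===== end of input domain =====

-- B replaces the per-step tail recursion (one insert/delete per call) with a single closed-form
-- slice assignment (simpler). Both Pythons mutate the argument in place; the equivalence proved
-- here is about the return value.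

-- ===== PORT A =====
def fill_list_with_zeros_in_beginning_to_size (list : List Int) (size : Int) : List Int :=
  if (list.length : Int) = size then list
  else if (list.length : Int) < size then
    fill_list_with_zeros_in_beginning_to_size (0 :: list) size
  else if list.isEmpty then []   -- totality guard: here Python's `del list[len(list)-1]` raises IndexError; excluded by Pre_
  else fill_list_with_zeros_in_beginning_to_size list.dropLast size
termination_by 2 * (size - list.length).toNat + list.length
decreasing_by
  · simp only [List.length_cons]; omega
  · rename_i h1 h2 h3
    rw [List.isEmpty_iff] at h3
    have : 0 < list.length := List.length_pos_iff.mpr h3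
    simp only [List.length_dropLast]; omega

-- ===== PORT B =====
-- Source B: list[:] = [0] * (size - len(list)) + list[:size]; return list
def fill_list_with_zeros_in_beginning_to_size_alt (list : List Int) (size : Int) : List Int :=
  List.replicate (size - (list.length : Int)).toNat 0 ++ PySem.List.slice list none (some size)

-- ===== PRECONDITION & SPEC =====
-- Pre_ excludes size < 0, on which A empties the list step by step and then raises IndexError.
def Pre_fill_list_with_zeros_in_beginning_to_size (list : List Int) (size : Int) : Prop := 0 ≤ size
instance (list : List Int) (size : Int) : Decidable (Pre_fill_list_with_zeros_in_beginning_to_size list size) := by unfold Pre_fill_list_with_zeros_in_beginning_to_size; infer_instance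
def pvWitness_fill_list_with_zeros_in_beginning_to_size : List Int × Int := ([1, 2, 3], 5)
def Spec_fill_list_with_zeros_in_beginning_to_size (list : List Int) (size : Int) (out : List Int) : Prop := out = fill_list_with_zeros_in_beginning_to_size_alt list size
instance (list : List Int) (size : Int) (out : List Int) : Decidable (Spec_fill_list_with_zeros_in_beginning_to_size list size out) := by unfold Spec_fill_list_with_zeros_in_beginning_to_size; infer_instance

-- ===== CLAIM (what is proved, stated in full; the proofs are below) =====
def Claim_equal_fill_list_with_zeros_in_beginning_to_size : Prop := ∀ (list : List Int) (size : Int), Dom_fill_list_with_zeros_in_beginning_to_size list size → Pre_fill_list_with_zeros_in_beginning_to_size list size → Spec_fill_list_with_zeros_in_beginning_to_size list size (fill_list_with_zeros_in_beginning_to_size list size)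

-- ===== LEMMAS AND PROOFS =====

-- A's recursion computes the closed form: (size - len) leading zeros followed by the first `size` elements.
theorem fill_closed_form (list : List Int) (size : Int) (h : 0 ≤ size) :
    fill_list_with_zeros_in_beginning_to_size list size =
      List.replicate (size - (list.length : Int)).toNat 0 ++ list.take size.toNat := by
  fun_induction fill_list_with_zeros_in_beginning_to_size list size with
  | case1 list heq =>
    have h1 : (size - (list.length : Int)).toNat = 0 := by omega
    have h2 : size.toNat = list.length := by omega
    simp [h1, h2]
  | case2 list hne hlt ih =>
    rw [ih]
    have h1 : (size - ((0 :: list).length : Int)).toNat + 1 = (size - (list.length : Int)).toNat := by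
      simp only [List.length_cons]; push_cast; omega
    have h2 : list.length + 1 ≤ size.toNat := by omega
    have htk : (0 :: list).take size.toNat = 0 :: list :=
      List.take_of_length_le (by simpa using h2)
    have htk' : list.take size.toNat = list := List.take_of_length_le (by omega)
    rw [htk, htk', ← h1, List.replicate_add]
    simp
  | case3 list hne hlt hemp =>
    rw [List.isEmpty_iff] at hemp
    subst hemp
    simp at hne hlt; omega
  | case4 list hne hlt hemp ih =>
    rw [List.isEmpty_iff] at hemp
    have hpos : 0 < list.length := List.length_pos_iff.mpr hemp
    rw [ih]
    have hz : (size - ((list.dropLast).length : Int)).toNat = 0 := by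
      simp only [List.length_dropLast]; omega
    have hz' : (size - (list.length : Int)).toNat = 0 := by omega
    rw [hz, hz']
    simp only [List.replicate_zero, List.nil_append]
    rw [List.dropLast_eq_take, List.take_take]
    congr 1
    omega

-- B unfolds to the same closed form (list[:size] is take for a nonnegative bound).
theorem alt_closed_form (list : List Int) (size : Int) (h : 0 ≤ size) :
    fill_list_with_zeros_in_beginning_to_size_alt list size =
      List.replicate (size - (list.length : Int)).toNat 0 ++ list.take size.toNat := by
  unfold fill_list_with_zeros_in_beginning_to_size_alt
  rw [PySem.List.slice_to list h]

-- ===== VERDICT (by name: the statement is the Claim_ definition above) =====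
theorem fill_list_with_zeros_in_beginning_to_size_spec : Claim_equal_fill_list_with_zeros_in_beginning_to_size := by
  intro list size _ hpre
  unfold Spec_fill_list_with_zeros_in_beginning_to_size
  rw [fill_closed_form list size hpre, alt_closed_form list size hpre]
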